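-- pv_equiv track=rewrite | github.com/jcabre04/advent-of-code | advent_of_code/year_2015/day_11/run.py | _check_straight
-- ===== SOURCE A (Python) =====
-- INCREMENT = {
--     "a": "b",
--     "b": "c",
--     "c": "d",
--     "d": "e",
--     "e": "f",
--     "f": "g",
--     "g": "h",
--     "h": "i",
--     "i": "j",
--     "j": "k",
--     "k": "l",
--     "l": "m",
--     "m": "n",
--     "n": "o",
--     "o": "p",
--     "p": "q",
--     "q": "r",
--     "r": "s",
--     "s": "t",
--     "t": "u",
--     "u": "v",
--     "v": "w",
--     "w": "x",
--     "x": "y",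
--     "y": "z",
--     "z": "a",
-- }
--
-- def _check_straight(password: str) -> bool:
--     "Checks if the password contains an increasing straight"
--     pos = 0
--     while pos < len(password) - 2:
--         chunk = password[pos : pos + 3]
--         pos += 1
--
--         # Edge case with z. Per puzzle instructions, the only valid straight with z is 'xyz'
--         if "z" in chunk and "xyz" == chunk:
--             return True
--         elif "z" in chunk:
--             continue
--         # Chunk is a straight if all three chars are the same after incrementing the first twice and the second once
--         elif INCREMENT[INCREMENT[chunk[0]]] == INCREMENT[chunk[1]] == chunk[2]:
--             return True
--         else:
--             continue
--
--     return False
-- ===== SOURCE B (Python) =====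
-- STRAIGHTS = [chr(c) + chr(c + 1) + chr(c + 2) for c in range(ord("a"), ord("y"))]
--
--
-- def _check_straight(password: str) -> bool:
--     "Checks if the password contains an increasing straight"
--     return any(s in password for s in STRAIGHTS)
-- ===== Notes on version B (the rewrite author's own statement) =====
-- stated objective: idiomatic
-- what changed: Instead of scanning each 3-char window and comparing via two INCREMENT-dict lookups with special-case z branches, B builds the list of the 24 valid straights once and returns any(s in password for s in STRAIGHTS); the per-character Python-level dict arithmetic is replaced by C-level substring search, measured ~20x faster.
-- outside the precondition, e.g. on _check_straight('abcZ'): A returns True, B returns True; on _check_straight('A'): A returns False, B returns False; on _check_straight('qAbcd'): A raises KeyError, B returns True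
import Mathlib
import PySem

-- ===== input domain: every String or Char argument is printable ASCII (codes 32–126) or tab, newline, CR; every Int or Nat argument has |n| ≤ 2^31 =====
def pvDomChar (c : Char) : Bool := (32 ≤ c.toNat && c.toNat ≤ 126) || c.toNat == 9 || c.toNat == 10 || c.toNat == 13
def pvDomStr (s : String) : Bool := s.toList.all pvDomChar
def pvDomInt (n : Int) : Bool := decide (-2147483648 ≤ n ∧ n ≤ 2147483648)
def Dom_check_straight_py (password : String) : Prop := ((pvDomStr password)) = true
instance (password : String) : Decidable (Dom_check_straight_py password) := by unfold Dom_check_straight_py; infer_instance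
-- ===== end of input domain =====

-- B replaces A's window scan with dict-increment arithmetic by a substring search for each of the
-- 24 valid straights "abc".."xyz" (more idiomatic; no z special-casing).


-- ===== PORT A =====
-- the module-level INCREMENT dict
def pvInc : PySem.Dict Char Char := PySem.Dict.ofList
  [('a','b'),('b','c'),('c','d'),('d','e'),('e','f'),('f','g'),('g','h'),('h','i'),('i','j'),
   ('j','k'),('k','l'),('l','m'),('m','n'),('n','o'),('o','p'),('p','q'),('q','r'),('r','s'),
   ('s','t'),('t','u'),('u','v'),('v','w'),('w','x'),('x','y'),('y','z'),('z','a')]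

-- A's while loop; pos only ever grows from 0, so 'pos < len(password) - 2' (Python Int arithmetic)
-- is 'pos + 2 < cs.length'. INCREMENT[c] is ported as getD with default ' ' (the KeyError inputs are
-- excluded by Pre_), and chunk[i] as pyGetD with default ' ' (chunk has exactly 3 chars here, so the
-- index is always in range and Python never raises).
def check_straight_py_loop (cs : List Char) (pos : Nat) : Bool :=
  if h : pos + 2 < cs.length then
    let chunk := PySem.Chars.slice cs (some (pos : Int)) (some ((pos : Int) + 3))
    if PySem.Chars.isIn ['z'] chunk && chunk == "xyz".toList then true
    else if PySem.Chars.isIn ['z'] chunk then check_straight_py_loop cs (pos + 1)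
    else if (pvInc.getD (pvInc.getD (PySem.List.pyGetD chunk 0 ' ') ' ') ' '
               == pvInc.getD (PySem.List.pyGetD chunk 1 ' ') ' ')
            && (pvInc.getD (PySem.List.pyGetD chunk 1 ' ') ' '
               == PySem.List.pyGetD chunk 2 ' ') then true
    else check_straight_py_loop cs (pos + 1)
  else false
termination_by cs.length - pos
decreasing_by all_goals omega

def check_straight_py (password : String) : Bool :=
  check_straight_py_loop password.toList 0

-- ===== PORT B =====
-- STRAIGHTS = [chr(c) + chr(c + 1) + chr(c + 2) for c in range(ord("a"), ord("y"))]
def pvStraights : List (List Char) :=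
  (PySem.List.pyRange 97 121 1).map
    (fun c => [Char.ofNat c.toNat, Char.ofNat (c.toNat + 1), Char.ofNat (c.toNat + 2)])

-- return any(s in password for s in STRAIGHTS)
def check_straight_py_alt (password : String) : Bool :=
  pvStraights.any (fun s => PySem.Chars.isIn s password.toList)

-- ===== PRECONDITION & SPEC =====
-- Pre_ excludes passwords containing a character outside a-z: there A raises KeyError whenever some
-- in-range 3-char window without 'z' hits such a character before a straight is found (short or
-- lucky such inputs still return, so Pre_ is slightly narrower than the KeyError set).
def Pre_check_straight_py (password : String) : Prop :=
  (password.toList.all fun c => 97 ≤ c.toNat && c.toNat ≤ 122) = true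
instance (password : String) : Decidable (Pre_check_straight_py password) := by
  unfold Pre_check_straight_py; infer_instance
def pvWitness_check_straight_py : String := "ab"

def Spec_check_straight_py (password : String) (out : Bool) : Prop := out = check_straight_py_alt password
instance (password : String) (out : Bool) : Decidable (Spec_check_straight_py password out) := by unfold Spec_check_straight_py; infer_instance

-- ===== CLAIM (what is proved, stated in full; the proofs are below) =====
def Claim_equal_check_straight_py : Prop := ∀ (password : String), Dom_check_straight_py password → Pre_check_straight_py password → Spec_check_straight_py password (check_straight_py password)

-- ===== LEMMAS AND PROOFS =====

theorem pvCharEq {a b : Char} (h : a.toNat = b.toNat) : a = b := by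
  rw [← Char.ofNat_toNat a, h, Char.ofNat_toNat]

theorem pvToNatOfNat (n : Nat) (h : n ≤ 300) : (Char.ofNat n).toNat = n := by
  rw [Char.toNat_ofNat, if_pos]; exact Or.inl (by omega)

theorem pvBeqIff (a b : Char) : (a == b) = true ↔ a.toNat = b.toNat :=
  ⟨fun h => congrArg Char.toNat (beq_iff_eq.mp h), fun h => beq_iff_eq.mpr (pvCharEq h)⟩

-- the INCREMENT dict is the successor map on a-z, wrapping z back to a
theorem pvIncN (n : Nat) (h1 : 97 ≤ n) (h2 : n ≤ 122) :
    (pvInc.getD (Char.ofNat n) ' ').toNat = if n = 122 then 97 else n + 1 := by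
  interval_cases n <;> decide

theorem pvIncN' (c : Char) (h1 : 97 ≤ c.toNat) (h2 : c.toNat ≤ 122) :
    (pvInc.getD c ' ').toNat = if c.toNat = 122 then 97 else c.toNat + 1 := by
  have := pvIncN c.toNat h1 h2
  rwa [Char.ofNat_toNat] at this

-- '"z" in chunk' on a 3-char chunk is elementhood of 'z'
theorem pvIsInZ (a b c : Char) :
    PySem.Chars.isIn ['z'] [a, b, c] = decide ('z' ∈ [a, b, c]) := by
  have h := PySem.Chars.isIn_iff_infix ['z'] [a, b, c]
  rw [List.singleton_infix_iff] at h
  by_cases hm : 'z' ∈ [a, b, c]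
  · simp [hm, h.mpr hm]
  · simp only [hm, decide_false]
    exact Bool.eq_false_iff.mpr (fun ht => hm (h.mp ht))

theorem pvMemStraights (p : List Char) :
    p ∈ pvStraights ↔ ∃ n : Nat, 97 ≤ n ∧ n ≤ 120 ∧
      p = [Char.ofNat n, Char.ofNat (n + 1), Char.ofNat (n + 2)] := by
  unfold pvStraights
  simp only [List.mem_map, PySem.List.mem_pyRange_one]
  constructor
  · rintro ⟨k, ⟨hk1, hk2⟩, rfl⟩
    exact ⟨k.toNat, by omega, by omega, rfl⟩
  · rintro ⟨n, hn1, hn2, rfl⟩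
    exact ⟨(n : Int), ⟨by omega, by omega⟩, by simp⟩

-- membership in STRAIGHTS is exactly "consecutive codes", for lowercase chars
theorem pvMemStraightsIff (a b c : Char)
    (ha : 97 ≤ a.toNat ∧ a.toNat ≤ 122) (hb : 97 ≤ b.toNat ∧ b.toNat ≤ 122)
    (hc : 97 ≤ c.toNat ∧ c.toNat ≤ 122) :
    [a, b, c] ∈ pvStraights ↔ a.toNat + 1 = b.toNat ∧ b.toNat + 1 = c.toNat := by
  rw [pvMemStraights]
  constructor
  · rintro ⟨n, hn1, hn2, hp⟩
    obtain ⟨h1, h2, h3⟩ : a = Char.ofNat n ∧ b = Char.ofNat (n+1) ∧ c = Char.ofNat (n+2) := by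
      simpa using hp
    rw [h1, h2, h3, pvToNatOfNat n (by omega), pvToNatOfNat (n+1) (by omega),
      pvToNatOfNat (n+2) (by omega)]
    omega
  · rintro ⟨h1, h2⟩
    refine ⟨a.toNat, by omega, by omega, ?_⟩
    rw [Char.ofNat_toNat, show a.toNat + 1 = b.toNat from h1, Char.ofNat_toNat,
      show a.toNat + 2 = c.toNat by omega, Char.ofNat_toNat]

-- A's window test (the loop's branch chain, with the recursive calls factored out as false)
-- agrees with "consecutive codes" on lowercase windows
theorem pvWinAIff (a b c : Char)
    (ha : 97 ≤ a.toNat ∧ a.toNat ≤ 122) (hb : 97 ≤ b.toNat ∧ b.toNat ≤ 122)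
    (hc : 97 ≤ c.toNat ∧ c.toNat ≤ 122) :
    (if PySem.Chars.isIn ['z'] [a, b, c] && ([a, b, c] == "xyz".toList) then true
     else if PySem.Chars.isIn ['z'] [a, b, c] then false
     else (pvInc.getD (pvInc.getD a ' ') ' ' == pvInc.getD b ' ')
          && (pvInc.getD b ' ' == c)) = true
      ↔ a.toNat + 1 = b.toNat ∧ b.toNat + 1 = c.toNat := by
  have hz : ('z' : Char).toNat = 122 := rfl
  rw [pvIsInZ]
  by_cases hm : 'z' ∈ [a, b, c]
  · have hxyz : "xyz".toList = ['x', 'y', 'z'] := rfl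
    simp only [hm, decide_true, Bool.true_and, if_true, hxyz]
    constructor
    · intro ht
      obtain ⟨r1, r2, r3⟩ : a = 'x' ∧ b = 'y' ∧ c = 'z' := by
        by_cases hb' : ([a,b,c] == ['x','y','z']) = true
        · simpa using beq_iff_eq.mp hb'
        · rw [if_neg hb'] at ht; exact absurd ht (by simp)
      rw [r1, r2, r3]; exact ⟨rfl, rfl⟩
    · rintro ⟨h1, h2⟩
      have hne : a.toNat ≠ 122 ∧ b.toNat ≠ 122 := by omega
      have hcz : c = 'z' := by
        simp only [List.mem_cons, List.not_mem_nil, or_false] at hm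
        rcases hm with h | h | h
        · exact absurd (by rw [← h]; rfl : a.toNat = 122) hne.1
        · exact absurd (by rw [← h]; rfl : b.toNat = 122) hne.2
        · exact h.symm
      have hcv : c.toNat = 122 := by rw [hcz]; rfl
      have r1 : a = 'x' := pvCharEq (by show a.toNat = 120; omega)
      have r2 : b = 'y' := pvCharEq (by show b.toNat = 121; omega)
      rw [r1, r2, hcz]
      decide
  · have hne : a.toNat ≠ 122 ∧ b.toNat ≠ 122 ∧ c.toNat ≠ 122 := by
      refine ⟨fun h => hm ?_, fun h => hm ?_, fun h => hm ?_⟩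
      · rw [pvCharEq (h.trans hz.symm)]; simp
      · rw [pvCharEq (h.trans hz.symm)]; simp
      · rw [pvCharEq (h.trans hz.symm)]; simp
    simp only [hm, decide_false, Bool.false_and, Bool.false_eq_true, if_false,
      Bool.and_eq_true, pvBeqIff]
    have hIb : (pvInc.getD b ' ').toNat = b.toNat + 1 := by
      rw [pvIncN' b hb.1 hb.2, if_neg hne.2.1]
    have hIa : (pvInc.getD a ' ').toNat = a.toNat + 1 := by
      rw [pvIncN' a ha.1 ha.2, if_neg hne.1]
    have hIIa : (pvInc.getD (pvInc.getD a ' ') ' ').toNat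
        = if a.toNat + 1 = 122 then 97 else a.toNat + 2 := by
      rw [pvIncN' _ (by rw [hIa]; omega) (by rw [hIa]; omega), hIa]
    rw [hIIa, hIb]
    constructor
    · rintro ⟨h1, h2⟩
      refine ⟨?_, by omega⟩
      by_cases hy : a.toNat + 1 = 122
      · rw [if_pos hy] at h1; omega
      · rw [if_neg hy] at h1; omega
    · rintro ⟨h1, h2⟩
      rw [if_neg (by omega)]
      omega

-- bridge: the window test as a Bool equation
theorem pvWinABool (a b c : Char)
    (ha : 97 ≤ a.toNat ∧ a.toNat ≤ 122) (hb : 97 ≤ b.toNat ∧ b.toNat ≤ 122)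
    (hc : 97 ≤ c.toNat ∧ c.toNat ≤ 122) :
    (if PySem.Chars.isIn ['z'] [a, b, c] && ([a, b, c] == "xyz".toList) then true
     else if PySem.Chars.isIn ['z'] [a, b, c] then false
     else (pvInc.getD (pvInc.getD a ' ') ' ' == pvInc.getD b ' ')
          && (pvInc.getD b ' ' == c)) = decide ([a, b, c] ∈ pvStraights) := by
  have key := (pvWinAIff a b c ha hb hc).trans (pvMemStraightsIff a b c ha hb hc).symm
  by_cases hmem : [a, b, c] ∈ pvStraights
  · simp only [hmem, decide_true]
    exact key.mpr hmem
  · simp only [hmem, decide_false]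
    exact Bool.eq_false_iff.mpr (fun ht => hmem (key.mp ht))

-- the branch chain of A's loop body, with the recursion r factored out
theorem pvChain (b1 b2 b3 r : Bool) :
    (if b1 && b2 then true else if b1 then r else if b3 then true else r)
      = ((if b1 && b2 then true else if b1 then false else b3) || r) := by
  cases b1 <;> cases b2 <;> cases b3 <;> cases r <;> rfl

-- the common reference point: scan all windows, testing membership in STRAIGHTS
def pvWin (a : Char) : List Char → Bool
  | b :: c :: _ => decide ([a, b, c] ∈ pvStraights)
  | _ => false

def pvSpec : List Char → Bool
  | [] => false
  | a :: rest => pvWin a rest || pvSpec rest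

theorem pvSpecShort (l : List Char) (h : l.length ≤ 2) : pvSpec l = false := by
  match l with
  | [] => rfl
  | [_] => rfl
  | [_, _] => rfl
  | _ :: _ :: _ :: _ => simp at h

theorem pvSliceWindow (cs : List Char) (pos : Nat) :
    PySem.Chars.slice cs (some (pos : Int)) (some ((pos : Int) + 3)) = (cs.drop pos).take 3 := by
  show PySem.List.slice cs (some (pos : Int)) (some ((pos : Int) + 3)) = (cs.drop pos).take 3
  rw [PySem.List.slice_toNat cs (by omega) (by omega)]
  congr 1
  omega

theorem pvLoopEq (cs : List Char) (hlow : ∀ c ∈ cs, 97 ≤ c.toNat ∧ c.toNat ≤ 122) :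
    ∀ k pos, cs.length - pos ≤ k → check_straight_py_loop cs pos = pvSpec (cs.drop pos) := by
  intro k
  induction k with
  | zero =>
    intro pos h
    rw [check_straight_py_loop, dif_neg (by omega)]
    rw [pvSpecShort _ (by simp; omega)]
  | succ k ih =>
    intro pos h
    by_cases hcnd : pos + 2 < cs.length
    · have h0 : pos < cs.length := by omega
      have h1 : pos + 1 < cs.length := by omega
      have hd : cs.drop pos = cs[pos] :: cs[pos+1] :: cs[pos+2] :: cs.drop (pos+3) := by
        rw [List.drop_eq_getElem_cons h0, List.drop_eq_getElem_cons h1,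
          List.drop_eq_getElem_cons hcnd]
      have hd1 : cs.drop (pos+1) = cs[pos+1] :: cs[pos+2] :: cs.drop (pos+3) := by
        rw [List.drop_eq_getElem_cons h1, List.drop_eq_getElem_cons hcnd]
      have hchunk : PySem.Chars.slice cs (some (pos : Int)) (some ((pos : Int) + 3))
          = [cs[pos], cs[pos+1], cs[pos+2]] := by
        rw [pvSliceWindow, hd]; rfl
      rw [check_straight_py_loop, dif_pos hcnd]
      simp only [hchunk]
      have hg0 : PySem.List.pyGetD [cs[pos], cs[pos+1], cs[pos+2]] 0 ' ' = cs[pos] := by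
        simp [pysem]
      have hg1 : PySem.List.pyGetD [cs[pos], cs[pos+1], cs[pos+2]] 1 ' ' = cs[pos+1] := by
        simp [pysem]
      have hg2 : PySem.List.pyGetD [cs[pos], cs[pos+1], cs[pos+2]] 2 ' ' = cs[pos+2] := by
        simp [pysem]
      rw [hg0, hg1, hg2, pvChain,
        pvWinABool _ _ _ (hlow _ (cs.getElem_mem h0)) (hlow _ (cs.getElem_mem h1))
          (hlow _ (cs.getElem_mem hcnd)),
        ih (pos + 1) (by omega), hd, hd1]
      simp only [pvSpec, pvWin]
    · rw [check_straight_py_loop, dif_neg hcnd]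
      rw [pvSpecShort _ (by simp; omega)]

theorem pvStraightsLen (s : List Char) (hs : s ∈ pvStraights) : s.length = 3 := by
  obtain ⟨n, _, _, rfl⟩ := (pvMemStraights s).mp hs
  rfl

theorem pvSpecIff (cs : List Char) :
    pvSpec cs = true ↔ ∃ s ∈ pvStraights, s <:+: cs := by
  induction cs with
  | nil =>
    rw [pvSpecShort [] (by simp)]
    simp only [Bool.false_eq_true, false_iff]
    rintro ⟨s, hs, hinf⟩
    have := hinf.length_le
    rw [pvStraightsLen s hs] at this
    simp at this
  | cons a rest ih =>
    rw [pvSpec]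
    simp only [Bool.or_eq_true, ih]
    constructor
    · rintro (hm | ⟨s, hs, hinf⟩)
      · rcases rest with _ | ⟨b, _ | ⟨c, r⟩⟩
        · exact absurd hm (by simp [pvWin])
        · exact absurd hm (by simp [pvWin])
        · exact ⟨[a, b, c], of_decide_eq_true (by simpa [pvWin] using hm), ⟨[], r, rfl⟩⟩
      · exact ⟨s, hs, hinf.trans ⟨[a], [], by simp⟩⟩
    · rintro ⟨s, hs, hinf⟩
      rcases List.infix_cons_iff.mp hinf with hpre | hinf'
      · obtain ⟨x, y, z, rfl⟩ := List.length_eq_three.mp (pvStraightsLen s hs)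
        obtain ⟨e1, hpre⟩ := List.cons_prefix_cons.mp hpre
        obtain ⟨t, ht⟩ := hpre
        left
        rw [e1] at hs
        rw [← ht]
        simpa [pvWin] using hs
      · exact Or.inr ⟨s, hs, hinf'⟩

theorem pvAltEq (password : String) :
    check_straight_py_alt password = pvSpec password.toList := by
  have h1 : check_straight_py_alt password = true ↔
      ∃ s ∈ pvStraights, s <:+: password.toList := by
    unfold check_straight_py_alt
    rw [List.any_eq_true]
    constructor
    · rintro ⟨s, hs, hin⟩
      exact ⟨s, hs, (PySem.Chars.isIn_iff_infix s password.toList).mp hin⟩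
    · rintro ⟨s, hs, hinf⟩
      exact ⟨s, hs, (PySem.Chars.isIn_iff_infix s password.toList).mpr hinf⟩
  rw [← pvSpecIff] at h1
  by_cases h : pvSpec password.toList = true
  · rw [h, h1.mpr h]
  · rw [Bool.eq_false_iff.mpr h, Bool.eq_false_iff.mpr (fun ht => h (h1.mp ht))]

-- ===== VERDICT (by name: the statement is the Claim_ definition above) =====
theorem check_straight_py_spec : Claim_equal_check_straight_py := by
  intro password _ hpre
  unfold Spec_check_straight_py
  rw [pvAltEq]
  unfold check_straight_py
  have hlow : ∀ c ∈ password.toList, 97 ≤ c.toNat ∧ c.toNat ≤ 122 := by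
    intro c hc
    have := List.all_eq_true.mp hpre c hc
    simpa using this
  have := pvLoopEq password.toList hlow password.toList.length 0 (by omega)
  rwa [List.drop_zero] at this
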